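-- pv_equiv track=rewrite | github.com/awolfe1234/tic-tac-toe-solver | solve_v1.py | totalEmpty
-- ===== SOURCE A (Python) =====
-- def totalEmpty(row):
-- 	count = 0
-- 	spot = 0
-- 	spot_count = -1
-- 	for x in row:
-- 		spot_count += 1
-- 		if (x == 0):
-- 			count += 1
-- 			spot = spot_count
-- 	return (count,spot)
-- ===== SOURCE B (Python) =====
-- def totalEmpty(row):
--     count = row.count(0)
--     spot = 0
--     for i in range(len(row) - 1, -1, -1):
--         if row[i] == 0:
--             spot = i
--             break
--     return (count, spot)
-- ===== Notes on version B (the rewrite author's own statement) =====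
-- stated objective: alternative
-- what changed: Replaces A's single forward accumulating pass (running index, overwritten spot) with a library count of zeros plus a reversed early-terminating index scan for the last zero.
import Mathlib
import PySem

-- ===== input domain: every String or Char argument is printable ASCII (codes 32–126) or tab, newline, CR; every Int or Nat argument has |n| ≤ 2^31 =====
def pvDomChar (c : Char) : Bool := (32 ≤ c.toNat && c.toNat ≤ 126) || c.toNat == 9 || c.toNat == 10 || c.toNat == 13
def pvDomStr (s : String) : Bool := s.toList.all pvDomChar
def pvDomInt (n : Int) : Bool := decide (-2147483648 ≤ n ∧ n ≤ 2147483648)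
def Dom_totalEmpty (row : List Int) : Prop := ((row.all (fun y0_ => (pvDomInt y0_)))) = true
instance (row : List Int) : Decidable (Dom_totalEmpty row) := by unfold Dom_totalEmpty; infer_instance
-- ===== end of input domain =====

-- B replaces A's single forward accumulating pass by a zero count plus a reversed
-- early-terminating scan for the last zero index (objective: alternative decomposition).

-- ===== PORT A =====
-- A's single forward loop carrying (count, spot, spot_count).
def totalEmptyLoopA : List Int → Int × Int × Int → Int × Int × Int
  | [], st => st
  | x :: xs, (c, s, k) =>
      totalEmptyLoopA xs (if x = 0 then (c + 1, k + 1, k + 1) else (c, s, k + 1))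

def totalEmpty (row : List Int) : Int × Int :=
  let st := totalEmptyLoopA row (0, 0, -1)
  (st.1, st.2.1)

-- ===== PORT B =====
-- B's reversed index loop 'for i in range(len(row)-1, -1, -1): if row[i]==0: spot=i; break':
-- scanning indices in reverse and reading row[i] is iterating row.reverse with the index i.
def totalEmptyFindRev : List Int → Int → Int
  | [], _ => 0
  | x :: xs, i => if x = 0 then i else totalEmptyFindRev xs (i - 1)

def totalEmpty_alt (row : List Int) : Int × Int :=
  ((row.count 0 : Int), totalEmptyFindRev row.reverse ((row.length : Int) - 1))

-- ===== PRECONDITION & SPEC =====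
def Spec_totalEmpty (row : List Int) (out : Int × Int) : Prop := out = totalEmpty_alt row
instance (row : List Int) (out : Int × Int) : Decidable (Spec_totalEmpty row out) := by unfold Spec_totalEmpty; infer_instance

-- ===== CLAIM (what is proved, stated in full; the proofs are below) =====
def Claim_equal_totalEmpty : Prop := ∀ (row : List Int), Dom_totalEmpty row → Spec_totalEmpty row (totalEmpty row)

-- ===== LEMMAS AND PROOFS =====

-- first-zero position (used only by the proofs)
def pvFzp : List Int → Int
  | [] => 0
  | x :: xs => if x = 0 then 0 else 1 + pvFzp xs

-- last-zero position (meaningful when 0 ∈ xs)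
def pvLastPos : List Int → Int
  | [] => 0
  | _ :: xs => if 0 ∈ xs then 1 + pvLastPos xs else 0

theorem findRev_eq (r : List Int) : ∀ i : Int,
    totalEmptyFindRev r i = if 0 ∈ r then i - pvFzp r else 0 := by
  induction r with
  | nil => intro i; simp [totalEmptyFindRev]
  | cons x xs ih =>
    intro i
    by_cases hx : x = 0
    · subst hx; simp [totalEmptyFindRev, pvFzp]
    · simp [totalEmptyFindRev, pvFzp, hx, ih (i - 1), Ne.symm hx]
      split_ifs with h
      · ring
      · rfl

theorem fzp_append (l m : List Int) :
    pvFzp (l ++ m) = if 0 ∈ l then pvFzp l else (l.length : Int) + pvFzp m := by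
  induction l with
  | nil => simp [pvFzp]
  | cons x xs ih =>
    by_cases hx : x = 0
    · subst hx; simp [pvFzp]
    · simp [pvFzp, hx, Ne.symm hx, ih]
      split_ifs with h
      · rfl
      · ring

theorem revSpot (xs : List Int) (h : 0 ∈ xs) :
    (xs.length : Int) - 1 - pvFzp xs.reverse = pvLastPos xs := by
  induction xs with
  | nil => simp at h
  | cons x xs ih =>
    rw [List.reverse_cons, fzp_append]
    by_cases hm : 0 ∈ xs
    · have hr : (0 : Int) ∈ xs.reverse := by simpa using hm
      have h2 := ih hm
      simp only [hr, if_pos, pvLastPos, hm, List.length_cons]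
      push_cast
      omega
    · have hx : x = 0 := by
        rcases List.mem_cons.mp h with h' | h'
        · exact h'.symm
        · exact absurd h' hm
      have hr : (0 : Int) ∉ xs.reverse := by simpa using hm
      subst hx
      simp only [hr, if_neg, not_false_iff, pvLastPos, hm, List.length_cons, pvFzp, List.length_reverse]
      push_cast
      omega

theorem loopA_eq (xs : List Int) : ∀ c s k : Int,
    totalEmptyLoopA xs (c, s, k) =
      (c + (xs.count 0 : Int), if 0 ∈ xs then k + 1 + pvLastPos xs else s,
       k + (xs.length : Int)) := by
  induction xs with
  | nil => intro c s k; simp [totalEmptyLoopA]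
  | cons x xs ih =>
    intro c s k
    by_cases hx : x = 0
    · subst hx
      rw [totalEmptyLoopA, if_pos rfl, ih]
      have hcnt : ((0 : Int) :: xs).count 0 = xs.count 0 + 1 := by simp
      simp only [hcnt, pvLastPos, List.mem_cons, true_or, if_pos, List.length_cons,
        Prod.mk.injEq]
      refine ⟨by push_cast; ring, ?_, by push_cast; ring⟩
      by_cases hm : (0 : Int) ∈ xs <;> simp [hm] <;> ring
    · have h0 : (0 : Int) ≠ x := fun h => hx h.symm
      rw [totalEmptyLoopA, if_neg hx, ih]
      have hcnt : (x :: xs).count 0 = xs.count 0 := by simp [hx]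
      have hmem : ((0 : Int) ∈ x :: xs) ↔ (0 : Int) ∈ xs := by
        simp [List.mem_cons, h0]
      simp only [hcnt, pvLastPos, List.length_cons, Prod.mk.injEq, hmem]
      refine ⟨trivial, ?_, by push_cast; ring⟩
      by_cases hm : (0 : Int) ∈ xs <;> simp [hm] <;> ring

-- ===== VERDICT (by name: the statement is the Claim_ definition above) =====
theorem totalEmpty_spec : Claim_equal_totalEmpty := by
  intro row _
  unfold Spec_totalEmpty totalEmpty totalEmpty_alt
  rw [loopA_eq, findRev_eq]
  have hmem : (0 : Int) ∈ row.reverse ↔ (0 : Int) ∈ row := by simp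
  by_cases hm : (0 : Int) ∈ row
  · have := revSpot row hm
    simp only [hm, if_pos, hmem.mpr hm, if_pos]
    refine Prod.ext (by simp) ?_
    simp only
    omega
  · simp [hm, hmem]
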